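-- pv_equiv track=rewrite | github.com/Askirbst/python | Discord Course/WeekOne/conditions.py | isLargest
-- ===== SOURCE A (Python) =====
-- def isLargest(num1, num2, num3):    # This function sorts the list of numbers from largest to smallest
--     list = [num1, num2, num3]
--     temp = 0
--     for i in range(2):
--         for j in range(2):
--             if list[j + 1] > list[i]:
--                 temp = list[i]
--                 list[i] = list[j + 1]
--                 list[j + 1] = temp
--
--     return list[0]
-- ===== SOURCE B (Python) =====
-- def isLargest(num1, num2, num3):
--     return max(num1, num2, num3)
-- ===== Notes on version B (the rewrite author's own statement) =====
-- stated objective: idiomatic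
-- what changed: Replaced the nested-loop in-place bubble sort of a 3-element list with a single builtin max(num1, num2, num3) call, proved to return the same value.
import Mathlib
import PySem

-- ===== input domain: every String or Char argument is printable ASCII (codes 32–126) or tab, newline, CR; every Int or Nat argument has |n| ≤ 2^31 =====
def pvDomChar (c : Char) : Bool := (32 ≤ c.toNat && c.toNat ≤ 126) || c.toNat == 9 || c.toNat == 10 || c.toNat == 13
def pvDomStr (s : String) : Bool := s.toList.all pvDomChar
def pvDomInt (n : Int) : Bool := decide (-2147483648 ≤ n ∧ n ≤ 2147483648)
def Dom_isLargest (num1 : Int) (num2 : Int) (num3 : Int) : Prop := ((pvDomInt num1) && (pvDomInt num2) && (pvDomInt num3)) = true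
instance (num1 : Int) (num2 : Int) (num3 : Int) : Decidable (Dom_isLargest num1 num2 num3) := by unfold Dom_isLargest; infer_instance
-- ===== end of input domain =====

-- B replaces A's nested swap loops over a 3-element list with a single max call (idiomatic).

-- ===== PORT A =====
-- loop body of A's conditional swap: temp = list[i]; list[i] = list[j+1]; list[j+1] = temp
-- (indices 0..2 on a 3-element list are always in range, so the `.getD 0` defaults are never taken)
def swapStep (l : List Int) (i j : Int) : List Int :=
  let vj := (PySem.List.pyGet? l (j + 1)).getD 0
  let vi := (PySem.List.pyGet? l i).getD 0
  if vj > vi then (l.set i.toNat vj).set (j + 1).toNat vi else l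

def isLargest (num1 : Int) (num2 : Int) (num3 : Int) : Int :=
  let list : List Int := [num1, num2, num3]
  let final := (PySem.List.pyRange 0 2 1).foldl (fun l i =>
    (PySem.List.pyRange 0 2 1).foldl (fun l j => swapStep l i j) l) list
  (PySem.List.pyGet? final 0).getD 0

-- ===== PORT B =====
def isLargest_alt (num1 : Int) (num2 : Int) (num3 : Int) : Int :=
  max num1 (max num2 num3)

-- ===== PRECONDITION & SPEC =====
def Spec_isLargest (num1 : Int) (num2 : Int) (num3 : Int) (out : Int) : Prop := out = isLargest_alt num1 num2 num3
instance (num1 : Int) (num2 : Int) (num3 : Int) (out : Int) : Decidable (Spec_isLargest num1 num2 num3 out) := by unfold Spec_isLargest; infer_instance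

-- ===== CLAIM (what is proved, stated in full; the proofs are below) =====
def Claim_equal_isLargest : Prop := ∀ (num1 : Int) (num2 : Int) (num3 : Int), Dom_isLargest num1 num2 num3 → Spec_isLargest num1 num2 num3 (isLargest num1 num2 num3)

-- ===== LEMMAS AND PROOFS =====
theorem isLargest_unfold (a b c : Int) :
    isLargest a b c
      = (PySem.List.pyGet? (swapStep (swapStep (swapStep (swapStep [a,b,c] 0 0) 0 1) 1 0) 1 1) 0).getD 0 := by
  simp only [isLargest, show PySem.List.pyRange 0 2 1 = [0,1] from by decide, List.foldl]

theorem step00 (a b c : Int) : swapStep [a,b,c] 0 0 = if b > a then [b,a,c] else [a,b,c] := by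
  by_cases h : b > a <;> simp [swapStep, PySem.List.pyGet?, PySem.List.pyIdx?, h]
theorem step01 (a b c : Int) : swapStep [a,b,c] 0 1 = if c > a then [c,b,a] else [a,b,c] := by
  by_cases h : c > a <;> simp [swapStep, PySem.List.pyGet?, PySem.List.pyIdx?, h]
theorem step10 (a b c : Int) : swapStep [a,b,c] 1 0 = [a,b,c] := by
  simp [swapStep, PySem.List.pyGet?, PySem.List.pyIdx?]
theorem step11 (a b c : Int) : swapStep [a,b,c] 1 1 = if c > b then [a,c,b] else [a,b,c] := by
  by_cases h : c > b <;> simp [swapStep, PySem.List.pyGet?, PySem.List.pyIdx?, h]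

theorem isLargest_eq_max (a b c : Int) :
    isLargest a b c = max a (max b c) := by
  rw [isLargest_unfold, step00]
  split_ifs with h1
  all_goals rw [step01]
  all_goals split_ifs with h2
  all_goals rw [step10, step11]
  all_goals split_ifs
  all_goals simp [PySem.List.pyGet?, PySem.List.pyIdx?]
  all_goals omega

-- ===== VERDICT (by name: the statement is the Claim_ definition above) =====
theorem isLargest_spec : Claim_equal_isLargest := by
  intro num1 num2 num3 _
  unfold Spec_isLargest isLargest_alt
  exact isLargest_eq_max num1 num2 num3
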